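-- pv_equiv track=rewrite | github.com/vamshiparvatham/Multiple-image-encryption-and-decryption | Project/Encryption.py | dna_code_to_int
-- ===== SOURCE A (Python) =====
-- def toDecimal(binary):
--     decimal = 0
--     for bit in binary:
--         decimal = decimal * 2 + bit
--     return decimal
--
-- Rule_reverse = [
--   {"A":0, "G":1, "C":2, "T":3},
--   {"A":0, "C":1, "G":2, "T":3},
--   {"G":0, "A":1, "T":2, "C":3},
--   {"C":0, "A":1, "T":2, "G":3},
--   {"G":0, "T":1, "A":2, "C":3},
--   {"C":0, "T":1, "A":2, "G":3},
--   {"T":0, "G":1, "C":2, "A":3},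
--   {"T":0, "C":1, "G":2, "A":3}
-- ]
--
-- def dna_code_to_int(s, rule):
--   b = []
--   for i in range(4):
--     a = Rule_reverse[rule][s[i]]
--     if(a == 0):
--       try:
--         b.append(0)
--         b.append(0)
--       except:
--         b = [0]
--         b = [0]
--     elif(a==1):
--       try:
--         b.append(0)
--         b.append(1)
--       except:
--         b = [0]
--         b = [1]
--     elif(a==2):
--       try:
--         b.append(1)
--         b.append(0)
--       except:
--         b = [1]
--         b = [0]
--     else:
--       try:
--         b.append(1)
--         b.append(1)
--       except:
--         b = [1]
--         b = [1]
--   a = toDecimal(b)   #30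
--   return a
-- ===== SOURCE B (Python) =====
-- RULES = ["AGCT", "ACGT", "GATC", "CATG", "GTAC", "CTAG", "TGCA", "TCGA"]
--
-- def dna_code_to_int(s, rule):
--     perm = RULES[rule]
--     value = 0
--     for c in s[:4]:
--         value = 4 * value + perm.index(c)
--     return value
-- ===== Notes on version B (the rewrite author's own statement) =====
-- stated objective: simpler
-- what changed: Replace the dict table + per-digit 2-bit expansion + separate toDecimal fold with a list of permutation strings: each digit is perm.index(c) and the value is accumulated directly in base 4 over the chars of s[:4].
import Mathlib
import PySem

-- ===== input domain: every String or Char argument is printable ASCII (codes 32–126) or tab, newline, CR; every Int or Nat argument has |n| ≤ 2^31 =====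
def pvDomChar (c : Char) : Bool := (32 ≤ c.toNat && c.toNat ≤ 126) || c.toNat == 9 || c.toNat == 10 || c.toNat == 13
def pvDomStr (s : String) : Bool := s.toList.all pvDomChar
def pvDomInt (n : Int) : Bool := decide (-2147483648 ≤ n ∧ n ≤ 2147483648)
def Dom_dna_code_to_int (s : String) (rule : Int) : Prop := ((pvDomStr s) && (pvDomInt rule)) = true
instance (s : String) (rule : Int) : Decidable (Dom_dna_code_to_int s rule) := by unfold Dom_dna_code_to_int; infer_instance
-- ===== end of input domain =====

-- B replaces A's dict table, per-digit 2-bit expansion and separate toDecimal fold by a list of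
-- permutation strings: digit = perm.index(c), accumulated in base 4 over the chars of s[:4] (objective: simpler).

-- ===== PORT A =====
-- the module-level table Rule_reverse
def Rule_reverse : List (PySem.Dict Char Int) :=
  [ PySem.Dict.ofList [('A',0),('G',1),('C',2),('T',3)]
  , PySem.Dict.ofList [('A',0),('C',1),('G',2),('T',3)]
  , PySem.Dict.ofList [('G',0),('A',1),('T',2),('C',3)]
  , PySem.Dict.ofList [('C',0),('A',1),('T',2),('G',3)]
  , PySem.Dict.ofList [('G',0),('T',1),('A',2),('C',3)]
  , PySem.Dict.ofList [('C',0),('T',1),('A',2),('G',3)]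
  , PySem.Dict.ofList [('T',0),('G',1),('C',2),('A',3)]
  , PySem.Dict.ofList [('T',0),('C',1),('G',2),('A',3)] ]

-- A's lookup expression Rule_reverse[rule][s[i]] (none = IndexError/KeyError, excluded by Pre_)
def pvLookup (s : String) (rule : Int) (i : Int) : Int :=
  ((PySem.List.pyGet? Rule_reverse rule).bind fun d =>
    (PySem.Str.pyGet? s i).bind fun c => PySem.Dict.get? d c).getD 0

-- A's helper toDecimal
def toDecimal (binary : List Int) : Int :=
  binary.foldl (fun decimal bit => decimal * 2 + bit) 0

def dna_code_to_int (s : String) (rule : Int) : Int :=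
  let b := (PySem.List.pyRange 0 4 1).foldl (fun b i =>
    let a := pvLookup s rule i
    if a == 0 then b ++ [0, 0]
    else if a == 1 then b ++ [0, 1]
    else if a == 2 then b ++ [1, 0]
    else b ++ [1, 1]) []
  toDecimal b

-- ===== PORT B =====
-- B's module-level table RULES (permutation strings)
def pvRULES : List String := ["AGCT", "ACGT", "GATC", "CATG", "GTAC", "CTAG", "TGCA", "TCGA"]

def dna_code_to_int_alt (s : String) (rule : Int) : Int :=
  let perm := (PySem.List.pyGet? pvRULES rule).getD ""   -- RULES[rule]; none = IndexError, excluded by Pre_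
  (PySem.Str.slice s none (some 4)).toList.foldl
    (fun value c => 4 * value + (((PySem.List.index? perm.toList c).getD 0 : Nat) : Int)) 0
    -- perm.index(c); none = ValueError, excluded by Pre_

-- ===== PRECONDITION & SPEC =====
-- Pre_ excludes exactly the inputs where Python A raises: rule outside the list's index range
-- (IndexError), s shorter than 4 (IndexError), or a first-4 character not in the rule dicts (KeyError).
def Pre_dna_code_to_int (s : String) (rule : Int) : Prop :=
  (-8 ≤ rule ∧ rule < 8) ∧ 4 ≤ s.toList.length ∧
    ((s.toList.take 4).all fun c => c == 'A' || c == 'C' || c == 'G' || c == 'T') = true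
instance (s : String) (rule : Int) : Decidable (Pre_dna_code_to_int s rule) := by
  unfold Pre_dna_code_to_int; infer_instance

def pvWitness_dna_code_to_int : String × Int := ("ACGT", 0)

def Spec_dna_code_to_int (s : String) (rule : Int) (out : Int) : Prop := out = dna_code_to_int_alt s rule
instance (s : String) (rule : Int) (out : Int) : Decidable (Spec_dna_code_to_int s rule out) := by unfold Spec_dna_code_to_int; infer_instance

-- ===== CLAIM (what is proved, stated in full; the proofs are below) =====
def Claim_equal_dna_code_to_int : Prop := ∀ (s : String) (rule : Int), Dom_dna_code_to_int s rule → Pre_dna_code_to_int s rule → Spec_dna_code_to_int s rule (dna_code_to_int s rule)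

-- ===== LEMMAS AND PROOFS =====

-- A's digit of a rule/char pair
def pvDictDigit (rule : Int) (c : Char) : Int :=
  ((PySem.List.pyGet? Rule_reverse rule).bind fun d => PySem.Dict.get? d c).getD 0

-- B's digit of a rule/char pair
def pvStrDigit (rule : Int) (c : Char) : Int :=
  (((PySem.List.index? ((PySem.List.pyGet? pvRULES rule).getD "").toList c).getD 0 : Nat) : Int)

-- the two tables agree on every valid rule and every DNA character
lemma pvDigit_eq (rule : Int) (c : Char) (hr : -8 ≤ rule ∧ rule < 8)
    (hc : (c == 'A' || c == 'C' || c == 'G' || c == 'T') = true) :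
    pvDictDigit rule c = pvStrDigit rule c := by
  obtain ⟨h1, h2⟩ := hr
  simp only [Bool.or_eq_true, beq_iff_eq] at hc
  rcases hc with ((rfl | rfl) | rfl) | rfl <;> interval_cases rule <;> decide

-- each digit is a base-4 digit
lemma pvDictDigit_range (rule : Int) (c : Char) :
    0 ≤ pvDictDigit rule c ∧ pvDictDigit rule c ≤ 3 := by
  unfold pvDictDigit
  cases hd : PySem.List.pyGet? Rule_reverse rule with
  | none => simp
  | some d =>
    have hmem := PySem.List.mem_of_pyGet?_eq_some _ hd
    simp only [Option.bind_some]
    cases hg : PySem.Dict.get? d c with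
    | none => simp
    | some v =>
      simp only [Option.getD_some]
      have hv : v ∈ d.values := by
        simp only [PySem.Dict.get?] at hg
        obtain ⟨p, hp, rfl⟩ := Option.map_eq_some_iff.mp hg
        exact List.mem_map.mpr ⟨p, List.mem_of_find?_eq_some hp, rfl⟩
      have hall : ∀ w ∈ d.values, 0 ≤ w ∧ w ≤ 3 := by fin_cases hmem <;> decide
      exact hall v hv

-- one iteration of A's loop, followed through toDecimal, is one base-4 step
lemma pvStep (b : List Int) (a : Int) (h0 : 0 ≤ a) (h3 : a ≤ 3) :
    toDecimal (if a == 0 then b ++ [0, 0]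
               else if a == 1 then b ++ [0, 1]
               else if a == 2 then b ++ [1, 0]
               else b ++ [1, 1]) = toDecimal b * 4 + a := by
  unfold toDecimal
  interval_cases a <;> simp [List.foldl_append, List.foldl] <;> ring

-- ===== VERDICT (by name: the statement is the Claim_ definition above) =====
theorem dna_code_to_int_spec : Claim_equal_dna_code_to_int := by
  intro s rule _ hpre
  obtain ⟨hr, hlen, hall⟩ := hpre
  unfold Spec_dna_code_to_int dna_code_to_int dna_code_to_int_alt
  -- destructure the first four characters of s
  obtain ⟨c0, t0⟩ : ∃ c t, s.toList = c :: t := by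
    cases h : s.toList with
    | nil => rw [h] at hlen; simp at hlen
    | cons c t => exact ⟨c, t, rfl⟩
  obtain ⟨l0, hs⟩ := t0
  obtain ⟨c1, l1, hs1⟩ : ∃ c t, l0 = c :: t := by
    cases h : l0 with
    | nil => rw [hs, h] at hlen; simp at hlen
    | cons c t => exact ⟨c, t, rfl⟩
  obtain ⟨c2, l2, hs2⟩ : ∃ c t, l1 = c :: t := by
    cases h : l1 with
    | nil => rw [hs, hs1, h] at hlen; simp at hlen
    | cons c t => exact ⟨c, t, rfl⟩
  obtain ⟨c3, l3, hs3⟩ : ∃ c t, l2 = c :: t := by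
    cases h : l2 with
    | nil => rw [hs, hs1, hs2, h] at hlen; simp at hlen
    | cons c t => exact ⟨c, t, rfl⟩
  have hsl : s.toList = c0 :: c1 :: c2 :: c3 :: l3 := by rw [hs, hs1, hs2, hs3]
  -- the character constraints
  rw [hsl] at hall
  simp only [List.take, List.all_cons, List.all_nil, Bool.and_eq_true, Bool.and_true] at hall
  obtain ⟨hc0, hc1, hc2, hc3⟩ := hall
  -- A's pvLookup at index i reads the i-th character
  have hlook : ∀ i : Int, ∀ c : Char, PySem.Str.pyGet? s i = some c →
      pvLookup s rule i = pvDictDigit rule c := by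
    intro i c h
    unfold pvLookup pvDictDigit
    rw [h]
    simp
  have hg0 : PySem.Str.pyGet? s 0 = some c0 := by
    show PySem.Str.pyGet? s ((0 : Nat) : Int) = some c0
    rw [PySem.Str.pyGet?_natCast, hsl]
    rfl
  have hg1 : PySem.Str.pyGet? s 1 = some c1 := by
    show PySem.Str.pyGet? s ((1 : Nat) : Int) = some c1
    rw [PySem.Str.pyGet?_natCast, hsl]
    rfl
  have hg2 : PySem.Str.pyGet? s 2 = some c2 := by
    show PySem.Str.pyGet? s ((2 : Nat) : Int) = some c2
    rw [PySem.Str.pyGet?_natCast, hsl]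
    rfl
  have hg3 : PySem.Str.pyGet? s 3 = some c3 := by
    show PySem.Str.pyGet? s ((3 : Nat) : Int) = some c3
    rw [PySem.Str.pyGet?_natCast, hsl]
    rfl
  -- evaluate A's loop into base-4 form
  have hrange : PySem.List.pyRange 0 4 1 = [0, 1, 2, 3] := by decide
  rw [hrange]
  simp only [List.foldl]
  rw [hlook 0 c0 hg0, hlook 1 c1 hg1, hlook 2 c2 hg2, hlook 3 c3 hg3]
  obtain ⟨ha0, hb0⟩ := pvDictDigit_range rule c0
  obtain ⟨ha1, hb1⟩ := pvDictDigit_range rule c1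
  obtain ⟨ha2, hb2⟩ := pvDictDigit_range rule c2
  obtain ⟨ha3, hb3⟩ := pvDictDigit_range rule c3
  rw [pvStep _ _ ha3 hb3, pvStep _ _ ha2 hb2, pvStep _ _ ha1 hb1, pvStep _ _ ha0 hb0]
  simp only [toDecimal, List.foldl_nil]
  -- evaluate B's loop
  have hslice : (PySem.Str.slice s none (some 4)).toList = [c0, c1, c2, c3] := by
    simp [PySem.Str.slice, PySem.List.slice_to, hsl]
  rw [hslice]
  simp only [List.foldl]
  rw [pvDigit_eq rule c0 hr hc0, pvDigit_eq rule c1 hr hc1,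
      pvDigit_eq rule c2 hr hc2, pvDigit_eq rule c3 hr hc3]
  unfold pvStrDigit
  ring
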